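-- pv_equiv track=rewrite | github.com/design-ops/sketch-to-uikit | src/transformer_enums.py | __parse_enum_file
-- ===== SOURCE A (Python) =====
-- def __parse_enum_file(src: str, data: dict) -> dict:
--     lines = src.splitlines()
--     parsing = None
--     for line in lines:
--         if parsing is None:
--             if line.startswith("public enum PlatformAsset"):
--                 parsing = "Asset"
--             elif line.startswith("public enum PlatformElement"):
--                 parsing = "Element"
--             elif line.startswith("public enum PlatformSection"):
--                 parsing = "Section"
--         elif parsing == "Asset":
--             if line.strip().startswith("case"):
--                 enum = line.strip().split(" ")[1]
--                 data["assets"].add(enum)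
--             elif line.strip().startswith("}"):
--                 parsing = None
--         elif parsing == "Element":
--             if line.strip().startswith("case"):
--                 enum = line.strip().split(" ")[1]
--                 data["elements"].add(enum)
--             elif line.strip().startswith("}"):
--                 parsing = None
--         elif parsing == "Section":
--             if line.strip().startswith("case"):
--                 enum = line.strip().split(" ")[1]
--                 data["sections"].add(enum)
--             elif line.strip().startswith("}"):
--                 parsing = None
--
--     return data
-- ===== SOURCE B (Python) =====
-- # B: tokenize-then-index algorithm. One pure tokenizing map classifies each
-- # line; header/close positions become index lists; blocks are computed as
-- # [header+1, next-close) spans by index arithmetic and emitted per span.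
-- # Mutates `data` in place like A; equivalence is about the return value.
-- def __parse_enum_file(src: str, data: dict) -> dict:
--     HEADERS = (("public enum PlatformAsset", "assets"),
--                ("public enum PlatformElement", "elements"),
--                ("public enum PlatformSection", "sections"))
--
--     def tok(line):
--         key = None
--         for h, k in HEADERS:
--             if line.startswith(h):
--                 key = k
--                 break
--         s = line.strip()
--         kind = 1 if s.startswith("case") else (2 if s.startswith("}") else 0)
--         return (key, kind, s)
--
--     toks = [tok(l) for l in src.splitlines()]
--     n = len(toks)
--     hdr = [(i, t[0]) for i, t in enumerate(toks) if t[0] is not None]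
--     clo = [i for i, t in enumerate(toks) if t[1] == 2]
--
--     pos = 0
--     for i, key in hdr:
--         if i < pos:
--             continue  # a header line sitting inside an open block is ignored
--         end = next((c for c in clo if c > i), n)
--         for _, kind, s in toks[i + 1:end]:
--             if kind == 1:
--                 data[key].add(s.split(" ")[1])
--         pos = end + 1
--     return data
-- ===== Notes on version B (the rewrite author's own statement) =====
-- stated objective: alternative
-- what changed: Replaces A's per-line three-state automaton (a 'parsing' flag threaded through one loop of string tests and set mutations) by a tokenize-then-index algorithm: a pure map classifies every line once into (header-key, kind, stripped), header and close positions are collected as index lists, each block becomes the index span [header+1, first close > header) computed by searching the close-index list, and case tokens are emitted from list slices; no parsing state flows through the line scan.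
import Mathlib
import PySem

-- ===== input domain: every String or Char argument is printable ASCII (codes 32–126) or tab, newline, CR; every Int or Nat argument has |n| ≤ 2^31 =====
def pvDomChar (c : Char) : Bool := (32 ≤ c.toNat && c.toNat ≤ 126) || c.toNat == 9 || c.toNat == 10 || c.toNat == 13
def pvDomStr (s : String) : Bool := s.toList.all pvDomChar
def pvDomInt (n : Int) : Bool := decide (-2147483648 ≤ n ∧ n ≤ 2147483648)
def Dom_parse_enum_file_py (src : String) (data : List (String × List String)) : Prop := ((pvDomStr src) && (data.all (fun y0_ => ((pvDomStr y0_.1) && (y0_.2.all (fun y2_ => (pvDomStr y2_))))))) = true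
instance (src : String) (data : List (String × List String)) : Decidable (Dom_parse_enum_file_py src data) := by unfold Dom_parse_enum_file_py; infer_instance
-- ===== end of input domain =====

-- B replaces A's per-line state machine by a tokenize-then-index algorithm (pure classification map,
-- header/close index lists, spans by index arithmetic); both Pythons mutate `data` in place — the
-- claim is about the return value.


-- ===== PORT A =====
-- line.strip().split(" ")[1] of both Pythons; the .getD "" default is only reached where Python
-- raises IndexError (no second piece), where B does the same.
def pvCaseName (s : String) : String :=
  String.ofList ((PySem.List.pyGet? (PySem.Chars.splitOn s.toList [' ']) 1).getD [])

-- one iteration of A's loop: state = (parsing, data); Dict.modify's [] default is only reached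
-- where Python raises KeyError (missing key), where B does the same.
def pvStepA (st : Option String × PySem.Dict String (PySem.Set String)) (line : String) :
    Option String × PySem.Dict String (PySem.Set String) :=
  match st with
  | (none, d) =>
      if PySem.Str.startswith line "public enum PlatformAsset" then (some "Asset", d)
      else if PySem.Str.startswith line "public enum PlatformElement" then (some "Element", d)
      else if PySem.Str.startswith line "public enum PlatformSection" then (some "Section", d)
      else (none, d)
  | (some p, d) =>
      if p == "Asset" then
        if PySem.Str.startswith (PySem.Str.strip line) "case" then
          (some p, d.modify "assets" [] (fun t => PySem.Set.add t (pvCaseName (PySem.Str.strip line))))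
        else if PySem.Str.startswith (PySem.Str.strip line) "}" then (none, d)
        else (some p, d)
      else if p == "Element" then
        if PySem.Str.startswith (PySem.Str.strip line) "case" then
          (some p, d.modify "elements" [] (fun t => PySem.Set.add t (pvCaseName (PySem.Str.strip line))))
        else if PySem.Str.startswith (PySem.Str.strip line) "}" then (none, d)
        else (some p, d)
      else if p == "Section" then
        if PySem.Str.startswith (PySem.Str.strip line) "case" then
          (some p, d.modify "sections" [] (fun t => PySem.Set.add t (pvCaseName (PySem.Str.strip line))))
        else if PySem.Str.startswith (PySem.Str.strip line) "}" then (none, d)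
        else (some p, d)
      else (some p, d)

def parse_enum_file_py (src : String) (data : List (String × List String)) : List (String × List String) :=
  (((PySem.Str.splitlines src).foldl pvStepA
      (none, (⟨data⟩ : PySem.Dict String (PySem.Set String)))).2).items

-- ===== PORT B =====
def pvHeaders : List (String × String) :=
  [("public enum PlatformAsset", "assets"),
   ("public enum PlatformElement", "elements"),
   ("public enum PlatformSection", "sections")]

-- the HEADERS loop of B's tok(): first matching header's key, else None
def pvFindKey (line : String) : Option String :=
  (pvHeaders.find? (fun hk => PySem.Str.startswith line hk.1)).map (·.2)

-- B's tok(line) = (header key or None, kind 0/1/2, stripped line)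
def pvTok (line : String) : Option String × Nat × String :=
  (pvFindKey line,
   (if PySem.Str.startswith (PySem.Str.strip line) "case" then 1
    else if PySem.Str.startswith (PySem.Str.strip line) "}" then 2 else 0),
   PySem.Str.strip line)

-- enumerate(toks) starting at p (B uses p = 0)
def pvIndexed {α : Type} : Nat → List α → List (Nat × α)
  | _, [] => []
  | p, t :: ts => (p, t) :: pvIndexed (p + 1) ts

-- B's hdr and clo index lists
def pvHdrOf (p : Nat) (ts : List (Option String × Nat × String)) : List (Nat × String) :=
  (pvIndexed p ts).filterMap (fun it => it.2.1.map (fun k => (it.1, k)))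

def pvCloOf (p : Nat) (ts : List (Option String × Nat × String)) : List Nat :=
  (pvIndexed p ts).filterMap (fun it => if it.2.2.1 == 2 then some it.1 else none)

-- body of B's inner `for … in toks[i+1:end]` loop
def pvEmitStep (key : String) (d : PySem.Dict String (PySem.Set String))
    (t : Option String × Nat × String) : PySem.Dict String (PySem.Set String) :=
  if t.2.1 == 1 then d.modify key [] (fun u => PySem.Set.add u (pvCaseName t.2.2)) else d

-- body of B's outer `for i, key in hdr` loop; state = (pos, data)
def pvBStep (toks : List (Option String × Nat × String)) (clo : List Nat) (n : Nat)
    (st : Nat × PySem.Dict String (PySem.Set String)) (ik : Nat × String) :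
    Nat × PySem.Dict String (PySem.Set String) :=
  if ik.1 < st.1 then st
  else
    let e := (clo.find? (fun c => decide (ik.1 < c))).getD n
    (e + 1, ((toks.drop (ik.1 + 1)).take (e - (ik.1 + 1))).foldl (pvEmitStep ik.2) st.2)

def parse_enum_file_py_alt (src : String) (data : List (String × List String)) : List (String × List String) :=
  let toks := (PySem.Str.splitlines src).map pvTok
  (((pvHdrOf 0 toks).foldl (pvBStep toks (pvCloOf 0 toks) toks.length)
      (0, (⟨data⟩ : PySem.Dict String (PySem.Set String)))).2).items

-- ===== PRECONDITION & SPEC =====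
-- No Pre_: both ports are total and agree on every input (where the Pythons raise —
-- a "case" line with no space inside a block, or a missing "assets"/"elements"/"sections"
-- key — both ports take the same total default path, so equality still holds).
def Spec_parse_enum_file_py (src : String) (data : List (String × List String)) (out : List (String × List String)) : Prop := out = parse_enum_file_py_alt src data
instance (src : String) (data : List (String × List String)) (out : List (String × List String)) : Decidable (Spec_parse_enum_file_py src data out) := by unfold Spec_parse_enum_file_py; infer_instance

-- ===== CLAIM (what is proved, stated in full; the proofs are below) =====
def Claim_equal_parse_enum_file_py : Prop := ∀ (src : String) (data : List (String × List String)), Dom_parse_enum_file_py src data → Spec_parse_enum_file_py src data (parse_enum_file_py src data)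

-- ===== LEMMAS AND PROOFS =====
-- Intermediate spec shared by both proofs: a region-extraction recursion over the lines.
def pvBlock (key : String) :
    List String → PySem.Dict String (PySem.Set String) →
      (List String × PySem.Dict String (PySem.Set String))
  | [], d => ([], d)
  | l :: rest, d =>
      let s := PySem.Str.strip l
      if PySem.Str.startswith s "case" then
        pvBlock key rest (d.modify key [] (fun t => PySem.Set.add t (pvCaseName s)))
      else if PySem.Str.startswith s "}" then (rest, d)
      else pvBlock key rest d

theorem pvBlock_fst_length_le (key : String) :
    ∀ (lines : List String) (d : PySem.Dict String (PySem.Set String)),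
      (pvBlock key lines d).1.length ≤ lines.length := by
  intro lines
  induction lines with
  | nil => intro d; simp [pvBlock]
  | cons l rest ih =>
      intro d
      simp only [pvBlock]
      split_ifs with h1 h2
      · exact le_trans (ih _) (Nat.le_succ _)
      · exact Nat.le_succ _
      · exact le_trans (ih _) (Nat.le_succ _)

def pvOuter :
    List String → PySem.Dict String (PySem.Set String) → PySem.Dict String (PySem.Set String)
  | [], d => d
  | l :: rest, d =>
      match pvFindKey l with
      | none => pvOuter rest d
      | some key => pvOuter (pvBlock key rest d).1 (pvBlock key rest d).2
  termination_by lines _ => lines.length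
  decreasing_by
  all_goals simp
  exact pvBlock_fst_length_le key rest d

-- ---- A-side: the foldl state machine equals pvOuter ----
theorem pvBlock_eq (label key : String)
    (h : (label = "Asset" ∧ key = "assets") ∨ (label = "Element" ∧ key = "elements") ∨
         (label = "Section" ∧ key = "sections")) :
    ∀ (lines : List String) (d : PySem.Dict String (PySem.Set String)),
      (lines.foldl pvStepA (some label, d)).2 =
        ((pvBlock key lines d).1.foldl pvStepA (none, (pvBlock key lines d).2)).2 := by
  intro lines
  induction lines with
  | nil => intro d; simp [pvBlock]
  | cons l rest ih =>
      intro d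
      rcases h with ⟨hl, hk⟩ | ⟨hl, hk⟩ | ⟨hl, hk⟩ <;> subst hl <;> subst hk <;>
        simp only [List.foldl_cons, pvStepA, pvBlock] <;>
        split_ifs with h1 h2 <;> simp_all

theorem pvOuter_eq :
    ∀ (n : Nat) (lines : List String) (d : PySem.Dict String (PySem.Set String)),
      lines.length ≤ n →
      (lines.foldl pvStepA (none, d)).2 = pvOuter lines d := by
  intro n
  induction n with
  | zero =>
      intro lines d hle
      have : lines = [] := List.eq_nil_of_length_eq_zero (Nat.le_zero.mp hle)
      subst this; simp [pvOuter]
  | succ n ih =>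
      intro lines d hle
      match lines with
      | [] => simp [pvOuter]
      | l :: rest =>
          have hrest : rest.length ≤ n := by simpa using Nat.lt_succ_iff.mp (Nat.lt_of_lt_of_le (by simp) hle)
          simp only [List.foldl_cons, pvStepA, pvOuter, pvFindKey, pvHeaders, List.find?]
          by_cases hA : PySem.Str.startswith l "public enum PlatformAsset"
          · simp only [hA, if_true]
            rw [pvBlock_eq "Asset" "assets" (Or.inl ⟨rfl, rfl⟩) rest d]
            exact ih _ _ (le_trans (pvBlock_fst_length_le _ rest d) hrest)
          · by_cases hE : PySem.Str.startswith l "public enum PlatformElement"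
            · simp only [hA, hE, Bool.false_eq_true, if_false, if_true, Option.map_some]
              rw [pvBlock_eq "Element" "elements" (Or.inr (Or.inl ⟨rfl, rfl⟩)) rest d]
              exact ih _ _ (le_trans (pvBlock_fst_length_le _ rest d) hrest)
            · by_cases hS : PySem.Str.startswith l "public enum PlatformSection"
              · simp only [hA, hE, hS, Bool.false_eq_true, if_false, if_true, Option.map_some]
                rw [pvBlock_eq "Section" "sections" (Or.inr (Or.inr ⟨rfl, rfl⟩)) rest d]
                exact ih _ _ (le_trans (pvBlock_fst_length_le _ rest d) hrest)
              · simp only [hA, hE, hS, Bool.false_eq_true, if_false, Option.map_none]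
                exact ih _ _ hrest

-- ---- B-side: the index-machinery fold equals pvOuter ----
theorem pvIndexed_append {α : Type} (p : Nat) (xs ys : List α) :
    pvIndexed p (xs ++ ys) = pvIndexed p xs ++ pvIndexed (p + xs.length) ys := by
  induction xs generalizing p with
  | nil => simp [pvIndexed]
  | cons x xs ih => simp [pvIndexed, ih, Nat.add_assoc, Nat.add_comm 1]

theorem pvHdrOf_append (p : Nat) (xs ys : List (Option String × Nat × String)) :
    pvHdrOf p (xs ++ ys) = pvHdrOf p xs ++ pvHdrOf (p + xs.length) ys := by
  simp [pvHdrOf, pvIndexed_append, List.filterMap_append]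

theorem pvCloOf_append (p : Nat) (xs ys : List (Option String × Nat × String)) :
    pvCloOf p (xs ++ ys) = pvCloOf p xs ++ pvCloOf (p + xs.length) ys := by
  simp [pvCloOf, pvIndexed_append, List.filterMap_append]

theorem pvHdrOf_bounds (p : Nat) (ts : List (Option String × Nat × String)) :
    ∀ ik ∈ pvHdrOf p ts, p ≤ ik.1 ∧ ik.1 < p + ts.length := by
  induction ts generalizing p with
  | nil => simp [pvHdrOf, pvIndexed]
  | cons t ts ih =>
      intro ik hik
      simp only [pvHdrOf, pvIndexed, List.filterMap_cons] at hik
      rcases ht : t.1 with _ | k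
      · rw [ht] at hik; simp only [Option.map_none] at hik
        have := ih (p+1) ik hik
        simp only [List.length_cons]; omega
      · rw [ht] at hik; simp only [Option.map_some] at hik
        rcases List.mem_cons.mp hik with h | h
        · subst h; simp only [List.length_cons]; omega
        · have := ih (p+1) ik h
          simp only [List.length_cons]; omega

theorem pvCloOf_bounds (p : Nat) (ts : List (Option String × Nat × String)) :
    ∀ c ∈ pvCloOf p ts, p ≤ c ∧ c < p + ts.length := by
  induction ts generalizing p with
  | nil => simp [pvCloOf, pvIndexed]
  | cons t ts ih =>
      intro c hc
      simp only [pvCloOf, pvIndexed, List.filterMap_cons] at hc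
      by_cases ht : t.2.1 == 2
      · rw [if_pos ht] at hc
        rcases List.mem_cons.mp hc with h | h
        · subst h; simp only [List.length_cons]; omega
        · have := ih (p+1) c h
          simp only [List.length_cons]; omega
      · rw [if_neg ht] at hc
        have := ih (p+1) c hc
        simp only [List.length_cons]; omega

-- entries already below pos are skipped without changing the state
theorem pvSkipFold (toks : List (Option String × Nat × String)) (clo : List Nat) (n : Nat)
    (l : List (Nat × String)) (p : Nat) (d : PySem.Dict String (PySem.Set String))
    (h : ∀ ik ∈ l, ik.1 < p) :
    l.foldl (pvBStep toks clo n) (p, d) = (p, d) := by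
  induction l with
  | nil => rfl
  | cons ik l ih =>
      simp only [List.foldl_cons, pvBStep, if_pos (h ik (List.mem_cons_self ..))]
      exact ih (fun x hx => h x (List.mem_cons_of_mem _ hx))

theorem pvFind?_all_true {α : Type} (p : α → Bool) :
    ∀ (l : List α), (∀ x ∈ l, p x = true) → l.find? p = l.head? := by
  intro l h
  cases l with
  | nil => rfl
  | cons x l => simp [List.find?_cons_of_pos, h x (List.mem_cons_self ..)]

-- the core block characterisation: pvBlock on lines.drop r returns the suffix after the first
-- close index ≥ r and the fold of case-emissions over the tokens strictly before it
theorem pvCloOf_cons (p : Nat) (t : Option String × Nat × String) (ts : List (Option String × Nat × String)) :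
    pvCloOf p (t :: ts) = if t.2.1 == 2 then p :: pvCloOf (p + 1) ts else pvCloOf (p + 1) ts := by
  by_cases h : t.2.1 = 2 <;> simp [pvCloOf, pvIndexed, h]

theorem pvHdrOf_cons (p : Nat) (t : Option String × Nat × String) (ts : List (Option String × Nat × String)) :
    pvHdrOf p (t :: ts) =
      (match t.1 with
       | some k => (p, k) :: pvHdrOf (p + 1) ts
       | none => pvHdrOf (p + 1) ts) := by
  rcases h : t.1 with _ | k <;> simp [pvHdrOf, pvIndexed, h]

theorem pvCloHead_ge (p n : Nat) (ts : List (Option String × Nat × String)) (h : p ≤ n) :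
    p ≤ (pvCloOf p ts).head?.getD n := by
  rcases hh : (pvCloOf p ts).head? with _ | c
  · simpa using h
  · have := (pvCloOf_bounds p ts c (List.mem_of_mem_head? hh)).1
    simpa using this

theorem pvPB (lines : List String) (key : String) :
    ∀ (ls : List String) (r : Nat) (d : PySem.Dict String (PySem.Set String)),
      lines.drop r = ls →
      pvBlock key ls d =
        (lines.drop (((pvCloOf r (ls.map pvTok)).head?.getD lines.length) + 1),
         ((ls.map pvTok).take ((((pvCloOf r (ls.map pvTok)).head?.getD lines.length)) - r)).foldl
            (pvEmitStep key) d) := by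
  intro ls
  induction ls with
  | nil =>
      intro r d hdrop
      simp only [List.map_nil, pvCloOf, pvIndexed, List.filterMap_nil, List.head?_nil,
        Option.getD_none, List.take_nil, List.foldl_nil, pvBlock]
      rw [List.drop_eq_nil_of_le (by omega)]
  | cons l ls ih =>
      intro r d hdrop
      have hr : r < lines.length := by
        by_contra hge
        rw [List.drop_eq_nil_of_le (by omega)] at hdrop
        exact List.cons_ne_nil _ _ hdrop.symm
      have hnext : lines.drop (r + 1) = ls := by
        rw [← List.drop_drop, hdrop]; rfl
      simp only [List.map_cons, pvCloOf_cons, pvBlock]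
      by_cases hc : PySem.Str.startswith (PySem.Str.strip l) "case"
      · have hkind : (pvTok l).2.1 = 1 := by
          unfold pvTok; rw [if_pos hc]
        rw [if_pos hc, hkind]
        simp only [show ((1 : Nat) == 2) = false from rfl, Bool.false_eq_true, if_false]
        have hge : r + 1 ≤ ((pvCloOf (r + 1) (ls.map pvTok)).head?.getD lines.length) :=
          pvCloHead_ge (r + 1) lines.length (ls.map pvTok) (by omega)
        rw [ih (r + 1) _ hnext]
        refine congrArg₂ Prod.mk rfl ?_
        rw [show ((pvCloOf (r + 1) (ls.map pvTok)).head?.getD lines.length) - r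
              = (((pvCloOf (r + 1) (ls.map pvTok)).head?.getD lines.length) - (r + 1)) + 1 from by omega]
        have hstep : pvEmitStep key d (pvTok l)
            = d.modify key [] (fun t => PySem.Set.add t (pvCaseName (PySem.Str.strip l))) := by
          unfold pvEmitStep; rw [hkind]; rfl
        rw [List.take_succ_cons, List.foldl_cons, hstep]
      · by_cases hb : PySem.Str.startswith (PySem.Str.strip l) "}"
        · have hkind : (pvTok l).2.1 = 2 := by
            unfold pvTok; rw [if_neg hc, if_pos hb]
          rw [if_neg hc, if_pos hb, hkind]
          simp only [show ((2 : Nat) == 2) = true from rfl, if_true, List.head?_cons,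
            Option.getD_some, Nat.sub_self, List.take_zero, List.foldl_nil]
          rw [hnext]
        · have hkind : (pvTok l).2.1 = 0 := by
            unfold pvTok; rw [if_neg hc, if_neg hb]
          rw [if_neg hc, if_neg hb, hkind]
          simp only [show ((0 : Nat) == 2) = false from rfl, Bool.false_eq_true, if_false]
          have hge : r + 1 ≤ ((pvCloOf (r + 1) (ls.map pvTok)).head?.getD lines.length) :=
            pvCloHead_ge (r + 1) lines.length (ls.map pvTok) (by omega)
          rw [ih (r + 1) _ hnext]
          refine congrArg₂ Prod.mk rfl ?_
          rw [show ((pvCloOf (r + 1) (ls.map pvTok)).head?.getD lines.length) - r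
                = (((pvCloOf (r + 1) (ls.map pvTok)).head?.getD lines.length) - (r + 1)) + 1 from by omega]
          have hstep : pvEmitStep key d (pvTok l) = d := by
            unfold pvEmitStep; rw [hkind]; rfl
          rw [List.take_succ_cons, List.foldl_cons, hstep]

-- the initial pos may be raised to any bound below every entry without changing the dict
theorem pvPosMono (toks : List (Option String × Nat × String)) (clo : List Nat) (n : Nat)
    (l : List (Nat × String)) (p p' : Nat) (d : PySem.Dict String (PySem.Set String))
    (hpp : p ≤ p') (h : ∀ ik ∈ l, p' ≤ ik.1) :
    (l.foldl (pvBStep toks clo n) (p, d)).2 = (l.foldl (pvBStep toks clo n) (p', d)).2 := by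
  cases l with
  | nil => rfl
  | cons ik l =>
      have h1 : p' ≤ ik.1 := h ik (List.mem_cons_self ..)
      simp only [List.foldl_cons, pvBStep, if_neg (by omega : ¬ ik.1 < p),
        if_neg (by omega : ¬ ik.1 < p')]

-- the global first-close-after-r is the local head of the suffix's close list
theorem pvFindClo (lines : List String) (r : Nat) (hr : r < lines.length) :
    (((pvCloOf 0 (lines.map pvTok)).find? (fun c => decide (r < c))).getD lines.length)
      = (pvCloOf (r + 1) ((lines.drop (r + 1)).map pvTok)).head?.getD lines.length := by
  have hsplit : lines.map pvTok
      = (lines.take (r + 1)).map pvTok ++ (lines.drop (r + 1)).map pvTok := by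
    rw [← List.map_append, List.take_append_drop]
  rw [hsplit, pvCloOf_append, List.find?_append]
  simp only [Nat.zero_add]
  have hlen : ((lines.take (r + 1)).map pvTok).length = r + 1 := by
    simp [List.length_take]; omega
  have hleft : ((pvCloOf 0 ((lines.take (r + 1)).map pvTok)).find? (fun c => decide (r < c))) = none := by
    apply List.find?_eq_none.mpr
    intro c hc
    have := (pvCloOf_bounds 0 _ c hc).2
    rw [hlen] at this
    simp; omega
  rw [hleft, hlen, Option.none_or]
  rw [pvFind?_all_true _ _ (fun c hc => by
    have := (pvCloOf_bounds (r + 1) _ c hc).1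
    simp; omega)]

theorem pvM (lines : List String) :
    ∀ (n : Nat) (ls : List String) (r : Nat) (d : PySem.Dict String (PySem.Set String)),
      ls.length ≤ n → lines.drop r = ls →
      ((pvHdrOf r (ls.map pvTok)).foldl
          (pvBStep (lines.map pvTok) (pvCloOf 0 (lines.map pvTok)) lines.length) (r, d)).2
        = pvOuter ls d := by
  intro n
  induction n with
  | zero =>
      intro ls r d hle _
      have : ls = [] := List.eq_nil_of_length_eq_zero (Nat.le_zero.mp hle)
      subst this
      simp [pvHdrOf, pvIndexed, pvOuter]
  | succ n ih =>
      intro ls r d hle hdrop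
      match ls with
      | [] => simp [pvHdrOf, pvIndexed, pvOuter]
      | l :: ls =>
          have hlen : ls.length ≤ n := by simpa using Nat.lt_succ_iff.mp (Nat.lt_of_lt_of_le (by simp) hle)
          have hr : r < lines.length := by
            by_contra hge
            rw [List.drop_eq_nil_of_le (by omega)] at hdrop
            exact List.cons_ne_nil _ _ hdrop.symm
          have hnext : lines.drop (r + 1) = ls := by
            rw [← List.drop_drop, hdrop]; rfl
          simp only [List.map_cons, pvHdrOf_cons]
          have htok1 : (pvTok l).1 = pvFindKey l := rfl
          rw [htok1]
          rcases hk : pvFindKey l with _ | key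
          · -- no header here: the entry list starts at r+1 while pos is still r
            rw [show pvOuter (l :: ls) d = pvOuter ls d from by rw [pvOuter]; rw [hk]]
            rw [pvPosMono _ _ _ _ r (r + 1) d (by omega)
              (fun ik hik => (pvHdrOf_bounds (r + 1) _ ik hik).1)]
            exact ih ls (r + 1) d hlen hnext
          · -- header at r: one pvBStep = the whole block
            rw [show pvOuter (l :: ls) d
                  = pvOuter (pvBlock key ls d).1 (pvBlock key ls d).2 from by rw [pvOuter]; rw [hk]]
            rw [List.foldl_cons]
            simp only [pvBStep, if_neg (by omega : ¬ r < r)]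
            set e := (((pvCloOf 0 (lines.map pvTok)).find? (fun c => decide (r < c))).getD lines.length) with he
            have heval : e = (pvCloOf (r + 1) (ls.map pvTok)).head?.getD lines.length := by
              rw [he, pvFindClo lines r hr, hnext]
            have hge : r + 1 ≤ e := by
              rw [heval]; exact pvCloHead_ge (r + 1) lines.length (ls.map pvTok) (by omega)
            -- the block result via pvPB
            have hpb := pvPB lines key ls (r + 1) d hnext
            rw [← heval] at hpb
            have hmapdrop : (lines.map pvTok).drop (r + 1) = ls.map pvTok := by
              rw [← List.map_drop, hnext]
            rw [hpb]
            -- split the remaining header entries at the end of the block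
            have hsplit : ls = ls.take (e - r) ++ ls.drop (e - r) := (List.take_append_drop ..).symm
            have htl : lines.drop (e + 1) = ls.drop (e - r) := by
              rw [show e + 1 = (r + 1) + (e - r) from by omega, ← List.drop_drop, hnext]
            rw [show pvHdrOf (r + 1) (ls.map pvTok)
                  = pvHdrOf (r + 1) ((ls.take (e - r)).map pvTok)
                    ++ pvHdrOf (r + 1 + (ls.take (e - r)).length) ((ls.drop (e - r)).map pvTok) from by
              conv_lhs => rw [hsplit]
              rw [List.map_append, pvHdrOf_append, List.length_map]]
            rw [List.foldl_append]
            rw [pvSkipFold _ _ _ _ (e + 1) _ (fun ik hik => by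
              have := (pvHdrOf_bounds (r + 1) _ ik hik).2
              have hlt : ik.1 < r + 1 + (ls.take (e - r)).length := by
                simpa [List.length_map] using this
              have : (ls.take (e - r)).length ≤ e - r := by simp [List.length_take]
              omega)]
            -- the dict argument of the recursive call
            rw [hmapdrop]
            by_cases hcase : e - r ≤ ls.length
            · have hlentake : (ls.take (e - r)).length = e - r := by simp [List.length_take]; omega
              rw [hlentake, show r + 1 + (e - r) = e + 1 from by omega]
              rw [← htl]
              exact ih (lines.drop (e + 1)) (e + 1) _
                (by rw [htl]; simp only [List.length_drop]; omega) rfl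
            · have hnil : ls.drop (e - r) = [] := List.drop_eq_nil_of_le (by omega)
              rw [hnil]
              simp only [List.map_nil, pvHdrOf, pvIndexed, List.filterMap_nil, List.foldl_nil]
              rw [htl, hnil]
              simp [pvOuter]

-- ===== VERDICT (by name: the statement is the Claim_ definition above) =====
theorem parse_enum_file_py_spec : Claim_equal_parse_enum_file_py := by
  intro src data _
  unfold Spec_parse_enum_file_py parse_enum_file_py parse_enum_file_py_alt
  rw [pvOuter_eq (PySem.Str.splitlines src).length _ _ (le_refl _)]
  simp only [List.length_map]
  rw [pvM (PySem.Str.splitlines src) (PySem.Str.splitlines src).length _ 0 _ (le_refl _) List.drop_zero]
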